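-- pv_equiv track=rewrite | github.com/HengXin666/HX-Music | pyTool/sb_ass.py | find_parentheses_token_range
-- ===== SOURCE A (Python) =====
-- from typing import List, Tuple, Optional
--
-- def find_parentheses_token_range(tokens: List[Tuple[str, str]]) -> Optional[Tuple[int, int]]:
--     """
--     Find first '(' token and its matching ')' position in token list.
--     Return (start_idx, end_idx) for inner content (excluding paren tokens).
--     If not found, return None.
--     """
--     # locate token indices where char is '(' or ')'
--     start = None
--     for i, (_, ch) in enumerate(tokens):
--         if ch == '(' or ch == '（':
--             start = i
--             break
--     if start is None:
--         return None
--     # find closing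
--     for j in range(start + 1, len(tokens)):
--         if tokens[j][1] == ')' or tokens[j][1] == '）':
--             return (start + 1, j)  # inner range excludes parentheses
--     return None
-- ===== SOURCE B (Python) =====
-- from typing import List, Tuple, Optional
--
-- def find_parentheses_token_range(tokens: List[Tuple[str, str]]) -> Optional[Tuple[int, int]]:
--     """Right-to-left fold: for each suffix keep (index of its first closer,
--     answer for that suffix); the answer for the whole list falls out at the end."""
--     close = None   # index of the first ')' / '）' in the current suffix
--     ans = None     # result for the current suffix
--     for i in range(len(tokens) - 1, -1, -1):
--         ch = tokens[i][1]
--         if ch == '(' or ch == '（':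
--             ans = (i + 1, close) if close is not None else None
--         elif ch == ')' or ch == '）':
--             close = i
--     return ans
-- ===== Notes on version B (the rewrite author's own statement) =====
-- stated objective: alternative
-- what changed: Replaced A's two forward scans (find the first opener, then an index loop forward for the first closer after it) with a single right-to-left fold that builds the output back-to-front, maintaining for each suffix the index of its first closer and the answer for that suffix.
import Mathlib
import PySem

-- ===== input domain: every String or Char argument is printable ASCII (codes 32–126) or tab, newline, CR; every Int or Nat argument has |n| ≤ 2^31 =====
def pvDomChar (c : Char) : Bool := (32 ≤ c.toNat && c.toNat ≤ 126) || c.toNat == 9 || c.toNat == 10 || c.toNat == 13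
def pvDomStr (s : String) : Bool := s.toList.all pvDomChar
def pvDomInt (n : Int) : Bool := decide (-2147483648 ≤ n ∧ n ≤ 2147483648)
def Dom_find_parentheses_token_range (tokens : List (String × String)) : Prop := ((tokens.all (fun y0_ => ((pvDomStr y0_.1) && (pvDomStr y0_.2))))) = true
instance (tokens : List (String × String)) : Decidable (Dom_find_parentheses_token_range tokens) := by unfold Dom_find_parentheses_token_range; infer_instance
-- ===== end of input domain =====

-- B replaces A's two forward scans with a single right-to-left fold that keeps, for each
-- suffix, the index of its first closer and the answer for that suffix; objective: alternative.

-- ===== PORT A =====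
-- first loop of A: absolute index of the first token whose char is '(' or '（'
def pvFindStartA : List (String × String) → Nat → Option Nat
  | [], _ => none
  | (_, ch) :: rest, i =>
      if ch = "(" ∨ ch = "（" then some i else pvFindStartA rest (i + 1)

-- second loop of A: for j in range(start+1, len(tokens)) looking for ')' or '）'
def pvFindCloseA (tokens : List (String × String)) (j : Nat) : Option Nat :=
  if h : j < tokens.length then
    if (tokens[j].2 = ")" ∨ tokens[j].2 = "）") then some j
    else pvFindCloseA tokens (j + 1)
  else none
termination_by tokens.length - j

def find_parentheses_token_range (tokens : List (String × String)) : Option (Int × Int) :=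
  match pvFindStartA tokens 0 with
  | none => none
  | some start =>
    match pvFindCloseA tokens (start + 1) with
    | none => none
    | some j => some ((start : Int) + 1, (j : Int))

-- ===== PORT B =====
-- B's backwards loop as a structural right fold over the tokens paired with their
-- absolute index i; state carried upward = (close, ans) of the suffix being left.
def pvFoldB : List (String × String) → Nat → Option Nat × Option (Int × Int)
  | [], _ => (none, none)
  | (_, ch) :: rest, i =>
      let st := pvFoldB rest (i + 1)
      if ch = "(" ∨ ch = "（" then
        (st.1, st.1.map (fun j => ((i : Int) + 1, (j : Int))))
      else if ch = ")" ∨ ch = "）" then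
        (some i, st.2)
      else st

def find_parentheses_token_range_alt (tokens : List (String × String)) : Option (Int × Int) :=
  (pvFoldB tokens 0).2

-- ===== PRECONDITION & SPEC =====
def Spec_find_parentheses_token_range (tokens : List (String × String)) (out : Option (Int × Int)) : Prop := out = find_parentheses_token_range_alt tokens
instance (tokens : List (String × String)) (out : Option (Int × Int)) : Decidable (Spec_find_parentheses_token_range tokens out) := by unfold Spec_find_parentheses_token_range; infer_instance

-- ===== CLAIM (what is proved, stated in full; the proofs are below) =====
def Claim_equal_find_parentheses_token_range : Prop := ∀ (tokens : List (String × String)), Dom_find_parentheses_token_range tokens → Spec_find_parentheses_token_range tokens (find_parentheses_token_range tokens)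

-- ===== LEMMAS AND PROOFS =====

-- list-structured version of A's closing scan
def closeScan : List (String × String) → Nat → Option Nat
  | [], _ => none
  | (_, ch) :: rest, i =>
      if ch = ")" ∨ ch = "）" then some i else closeScan rest (i + 1)

lemma findCloseA_eq_aux (tokens : List (String × String)) :
    ∀ (n j : Nat), tokens.length - j ≤ n →
      pvFindCloseA tokens j = closeScan (tokens.drop j) j := by
  intro n
  induction n with
  | zero =>
      intro j hj
      rw [pvFindCloseA, dif_neg (by omega), List.drop_eq_nil_of_le (by omega)]
      rfl
  | succ n ih =>
      intro j hj
      by_cases h : j < tokens.length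
      · rw [pvFindCloseA, dif_pos h, List.drop_eq_getElem_cons h]
        obtain ⟨a, b⟩ := tokens[j]
        simp only [closeScan]
        split_ifs with hb
        · rfl
        · exact ih (j + 1) (by omega)
      · rw [pvFindCloseA, dif_neg h, List.drop_eq_nil_of_le (by omega)]
        rfl

lemma findCloseA_eq_closeScan (tokens : List (String × String)) (j : Nat) :
    pvFindCloseA tokens j = closeScan (tokens.drop j) j :=
  findCloseA_eq_aux tokens (tokens.length - j) j le_rfl

lemma findStartA_ge (tokens : List (String × String)) (i s : Nat)
    (h : pvFindStartA tokens i = some s) : i ≤ s := by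
  induction tokens generalizing i with
  | nil => simp [pvFindStartA] at h
  | cons t rest ih =>
      obtain ⟨a, ch⟩ := t
      by_cases hc : ch = "(" ∨ ch = "（"
      · simp [pvFindStartA, hc] at h; omega
      · simp [pvFindStartA, hc] at h; have := ih (i + 1) h; omega

-- the fold's invariant: first component = A's closing scan of the suffix,
-- second component = A's two-stage result restricted to the suffix
lemma foldB_spec (tokens : List (String × String)) (i : Nat) :
    pvFoldB tokens i =
      (closeScan tokens i,
       match pvFindStartA tokens i with
       | none => none
       | some s => (closeScan (tokens.drop (s + 1 - i)) (s + 1)).map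
           (fun j => ((s : Int) + 1, (j : Int)))) := by
  induction tokens generalizing i with
  | nil => simp [pvFoldB, closeScan, pvFindStartA]
  | cons t rest ih =>
      obtain ⟨a, ch⟩ := t
      by_cases ho : ch = "(" ∨ ch = "（"
      · have hc : ¬ (ch = ")" ∨ ch = "）") := by
          rcases ho with h | h <;> subst h <;> decide
        simp only [pvFoldB, closeScan, pvFindStartA, if_pos ho, if_neg hc, ih (i + 1)]
        have h1 : i + 1 - i = 1 := by omega
        simp only [h1, List.drop_one, List.tail_cons]
      · by_cases hc : ch = ")" ∨ ch = "）"
        · simp only [pvFoldB, closeScan, pvFindStartA, if_pos hc, if_neg ho, ih (i + 1)]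
          cases hs : pvFindStartA rest (i + 1) with
          | none => rfl
          | some s =>
              have hge := findStartA_ge rest (i + 1) s hs
              have h2 : s + 1 - i = (s + 1 - (i + 1)) + 1 := by omega
              simp only [h2, List.drop_succ_cons]
        · simp only [pvFoldB, closeScan, pvFindStartA, if_neg hc, if_neg ho, ih (i + 1)]
          cases hs : pvFindStartA rest (i + 1) with
          | none => rfl
          | some s =>
              have hge := findStartA_ge rest (i + 1) s hs
              have h2 : s + 1 - i = (s + 1 - (i + 1)) + 1 := by omega
              simp only [h2, List.drop_succ_cons]

-- ===== VERDICT (by name: the statement is the Claim_ definition above) =====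
theorem find_parentheses_token_range_spec : Claim_equal_find_parentheses_token_range := by
  intro tokens _
  unfold Spec_find_parentheses_token_range find_parentheses_token_range find_parentheses_token_range_alt
  rw [foldB_spec tokens 0]
  cases hs : pvFindStartA tokens 0 with
  | none => rfl
  | some s =>
      simp only [findCloseA_eq_closeScan]
      cases closeScan (tokens.drop (s + 1)) (s + 1) <;> rfl
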